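-- pv_equiv track=rewrite | github.com/Jaiashar/vora-business-finder | oregon_scraper.py | is_admin_email
-- ===== SOURCE A (Python) =====
-- def is_admin_email(email):
--     """Filter out department/admin/generic emails."""
--     admin_patterns = [
--         'info@', 'admin@', 'office@', 'dept@', 'webmaster@', 'help@',
--         'support@', 'contact@', 'registrar@', 'grad@', 'gradoffice@',
--         'department@', 'chair@', 'advising@', 'undergrad@', 'dean@',
--         'reception@', 'main@', 'general@', 'staff@', 'gradadmit@',
--         'calendar@', 'events@', 'news@', 'newsletter@', 'web@',
--         'marketing@', 'media@', 'communications@', 'hr@', 'hiring@',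
--         'jobs@', 'career@', 'alumni@', 'development@', 'giving@',
--         'feedback@', 'safety@', 'security@', 'facilities@', 'it@',
--         'tech@', 'helpdesk@', 'library@', 'gradapp@', 'apply@',
--         'admissions@', 'enrollment@', 'records@', 'bursar@',
--         'finaid@', 'housing@', 'dining@', 'parking@', 'police@',
--         'noreply@', 'do-not-reply@', 'donotreply@',
--         'uocomm@', 'uonews@', 'provost@', 'president@',
--         'commencement@', 'diversity@', 'equity@', 'titleix@',
--         'gradschool@', 'gradprog@', 'gradstudies@',
--         'depthead@', 'frontdesk@', 'mainoffice@',
--         'reserve@', 'uoregon@', 'asuo@', 'emerald@',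
--     ]
--     email_lower = email.lower()
--     return any(email_lower.startswith(p) for p in admin_patterns)
-- ===== SOURCE B (Python) =====
-- _ADMIN_LOCALS = frozenset(
--     "info admin office dept webmaster help support contact".split()
--     + "registrar grad gradoffice department chair advising".split()
--     + "undergrad dean reception main general staff gradadmit".split()
--     + "calendar events news newsletter web marketing media".split()
--     + "communications hr hiring jobs career alumni development".split()
--     + "giving feedback safety security facilities it tech helpdesk".split()
--     + "library gradapp apply admissions enrollment records".split()
--     + "bursar finaid housing dining parking police noreply".split()
--     + "do-not-reply donotreply uocomm uonews provost president".split()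
--     + "commencement diversity equity titleix gradschool gradprog".split()
--     + "gradstudies depthead frontdesk mainoffice reserve uoregon".split()
--     + "asuo emerald".split()
-- )
--
--
-- def is_admin_email(email):
--     """Filter out department/admin/generic emails."""
--     local, sep, _ = email.lower().partition("@")
--     return sep == "@" and local in _ADMIN_LOCALS
-- ===== Notes on version B (the rewrite author's own statement) =====
-- stated objective: idiomatic
-- what changed: Replaces A's 76-iteration startswith scan with a frozenset of bare local parts built once from split word strings, plus one partition at the first at-sign and a single membership test of the local part.
import Mathlib
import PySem

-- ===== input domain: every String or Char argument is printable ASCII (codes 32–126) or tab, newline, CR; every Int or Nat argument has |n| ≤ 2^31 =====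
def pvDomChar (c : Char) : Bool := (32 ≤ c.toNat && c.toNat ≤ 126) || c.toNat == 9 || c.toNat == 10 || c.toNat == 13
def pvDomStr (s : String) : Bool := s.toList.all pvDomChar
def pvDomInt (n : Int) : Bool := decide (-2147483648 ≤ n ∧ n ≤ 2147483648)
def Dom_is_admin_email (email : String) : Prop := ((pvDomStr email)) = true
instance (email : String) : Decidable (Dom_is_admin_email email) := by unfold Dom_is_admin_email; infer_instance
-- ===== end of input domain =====

-- B replaces A's per-pattern startswith scan by one frozenset of bare local parts (built once
-- by splitting word strings) and a single membership test of the part before the first '@'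
-- (idiomatic; return value proved equal).

-- ===== PORT A =====
def adminPatterns : List String := ["info@", "admin@", "office@", "dept@", "webmaster@", "help@", "support@", "contact@", "registrar@", "grad@", "gradoffice@", "department@", "chair@", "advising@", "undergrad@", "dean@", "reception@", "main@", "general@", "staff@", "gradadmit@", "calendar@", "events@", "news@", "newsletter@", "web@", "marketing@", "media@", "communications@", "hr@", "hiring@", "jobs@", "career@", "alumni@", "development@", "giving@", "feedback@", "safety@", "security@", "facilities@", "it@", "tech@", "helpdesk@", "library@", "gradapp@", "apply@", "admissions@", "enrollment@", "records@", "bursar@", "finaid@", "housing@", "dining@", "parking@", "police@", "noreply@", "do-not-reply@", "donotreply@", "uocomm@", "uonews@", "provost@", "president@", "commencement@", "diversity@", "equity@", "titleix@", "gradschool@", "gradprog@", "gradstudies@", "depthead@", "frontdesk@", "mainoffice@", "reserve@", "uoregon@", "asuo@", "emerald@"]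

def is_admin_email (email : String) : Bool :=
  let email_lower := PySem.Str.lower email
  adminPatterns.any (fun p => PySem.Str.startswith email_lower p)

-- ===== PORT B =====
-- _ADMIN_LOCALS = frozenset("…".split() + … + "…".split())
def adminLocals : PySem.Set String :=
  PySem.Set.ofList
    (PySem.Str.split₀ "info admin office dept webmaster help support contact"
    ++ PySem.Str.split₀ "registrar grad gradoffice department chair advising"
    ++ PySem.Str.split₀ "undergrad dean reception main general staff gradadmit"
    ++ PySem.Str.split₀ "calendar events news newsletter web marketing media"
    ++ PySem.Str.split₀ "communications hr hiring jobs career alumni development"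
    ++ PySem.Str.split₀ "giving feedback safety security facilities it tech helpdesk"
    ++ PySem.Str.split₀ "library gradapp apply admissions enrollment records"
    ++ PySem.Str.split₀ "bursar finaid housing dining parking police noreply"
    ++ PySem.Str.split₀ "do-not-reply donotreply uocomm uonews provost president"
    ++ PySem.Str.split₀ "commencement diversity equity titleix gradschool gradprog"
    ++ PySem.Str.split₀ "gradstudies depthead frontdesk mainoffice reserve uoregon"
    ++ PySem.Str.split₀ "asuo emerald")

def is_admin_email_alt (email : String) : Bool :=
  -- email.lower().partition('@') ported exactly for the one-char separator:
  -- local = chars before the first '@' (takeWhile), sep == '@' ↔ '@' occurs in the string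
  let cs := (PySem.Str.lower email).toList
  cs.contains '@' && PySem.Set.contains adminLocals (String.ofList (cs.takeWhile (fun c => c != '@')))

-- ===== PRECONDITION & SPEC =====
def Spec_is_admin_email (email : String) (out : Bool) : Prop := out = is_admin_email_alt email
instance (email : String) (out : Bool) : Decidable (Spec_is_admin_email email out) := by unfold Spec_is_admin_email; infer_instance

-- ===== CLAIM (what is proved, stated in full; the proofs are below) =====
def Claim_equal_is_admin_email : Prop := ∀ (email : String), Dom_is_admin_email email → Spec_is_admin_email email (is_admin_email email)

-- ===== LEMMAS AND PROOFS =====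
-- the value of B's frozenset, spelled out (proof-side only)
def localWords : List String := ["info", "admin", "office", "dept", "webmaster", "help", "support", "contact", "registrar", "grad", "gradoffice", "department", "chair", "advising", "undergrad", "dean", "reception", "main", "general", "staff", "gradadmit", "calendar", "events", "news", "newsletter", "web", "marketing", "media", "communications", "hr", "hiring", "jobs", "career", "alumni", "development", "giving", "feedback", "safety", "security", "facilities", "it", "tech", "helpdesk", "library", "gradapp", "apply", "admissions", "enrollment", "records", "bursar", "finaid", "housing", "dining", "parking", "police", "noreply", "do-not-reply", "donotreply", "uocomm", "uonews", "provost", "president", "commencement", "diversity", "equity", "titleix", "gradschool", "gradprog", "gradstudies", "depthead", "frontdesk", "mainoffice", "reserve", "uoregon", "asuo", "emerald"]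

set_option maxHeartbeats 2000000 in
set_option maxRecDepth 100000 in
lemma locals_eval : adminLocals = localWords := by decide

set_option maxRecDepth 100000 in
lemma patterns_are_locals :
    adminPatterns.map String.toList = localWords.map (fun b => b.toList ++ ['@']) := by
  decide

set_option maxRecDepth 100000 in
lemma words_no_at : ∀ b ∈ localWords, '@' ∉ b.toList := by decide

lemma prefix_at_iff (b : List Char) (h : '@' ∉ b) : ∀ cs : List Char,
    (b ++ ['@'] <+: cs ↔ '@' ∈ cs ∧ cs.takeWhile (fun c => c != '@') = b) := by
  induction b with
  | nil =>
    intro cs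
    cases cs with
    | nil => simp
    | cons c cs' =>
      by_cases hc : c = '@'
      · subst hc; simp [List.cons_prefix_cons]
      · simp [List.cons_prefix_cons, hc, Ne.symm hc]
  | cons x xs ih =>
    have hx : x ≠ '@' := fun hx => h (by simp [hx])
    have hxs : '@' ∉ xs := fun hm => h (by simp [hm])
    intro cs
    cases cs with
    | nil => simp
    | cons c cs' =>
      simp only [List.cons_append, List.cons_prefix_cons, List.takeWhile_cons]
      by_cases hc : c = x
      · subst hc
        simp [hx, Ne.symm hx, ih hxs cs']
      · by_cases hq : c = '@'
        · subst hq; simp [hx]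
        · simp [hq, hc, Ne.symm hc]

lemma startswith_at (cs b : List Char) (h : '@' ∉ b) :
    PySem.Chars.startswith cs (b ++ ['@']) =
      (cs.contains '@' && (cs.takeWhile (fun c => c != '@') == b)) := by
  rw [Bool.eq_iff_iff]
  simp only [PySem.Chars.startswith_iff, Bool.and_eq_true, List.contains_eq_mem,
    decide_eq_true_eq, beq_iff_eq]
  exact prefix_at_iff b h cs

lemma any_startswith_eq (cs : List Char) (L : List String) (h : ∀ b ∈ L, '@' ∉ b.toList) :
    (L.any fun b => PySem.Chars.startswith cs (b.toList ++ ['@'])) =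
      (cs.contains '@' && L.any fun b => cs.takeWhile (fun c => c != '@') == b.toList) := by
  induction L with
  | nil => simp
  | cons b bs ih =>
    simp only [List.any_cons, ih (fun x hx => h x (List.mem_cons_of_mem b hx)),
      startswith_at cs b.toList (h b (List.mem_cons_self)), Bool.and_or_distrib_left]

lemma set_contains_eq (l : List Char) :
    PySem.Set.contains adminLocals (String.ofList l) =
      localWords.any (fun b => l == b.toList) := by
  rw [Bool.eq_iff_iff]
  simp only [PySem.Set.contains, locals_eval, List.contains_eq_mem, decide_eq_true_eq,
    List.any_eq_true, beq_iff_eq]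
  constructor
  · intro hm; exact ⟨String.ofList l, hm, by simp⟩
  · rintro ⟨b, hb, he⟩
    have : String.ofList l = b := by simp [he]
    exact this ▸ hb

-- ===== VERDICT (by name: the statement is the Claim_ definition above) =====
theorem is_admin_email_spec : Claim_equal_is_admin_email := by
  intro email _
  unfold Spec_is_admin_email is_admin_email is_admin_email_alt
  simp only [PySem.Str.startswith_eq, set_contains_eq]
  have h1 : (adminPatterns.any fun p =>
        PySem.Chars.startswith (PySem.Str.lower email).toList p.toList)
      = localWords.any fun b =>
        PySem.Chars.startswith (PySem.Str.lower email).toList (b.toList ++ ['@']) := by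
    have h := List.any_map (l := adminPatterns) (f := String.toList)
      (p := fun l => PySem.Chars.startswith (PySem.Str.lower email).toList l)
    rw [patterns_are_locals, List.any_map] at h
    exact h.symm
  rw [h1, any_startswith_eq _ localWords words_no_at]
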